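-- pv_equiv track=rewrite | github.com/astroboi-SH-KWON/analyze_marmoset_monkey | LogicPrep.py | target_seq_with_clvg_site_group_by_chromosome
-- ===== SOURCE A (Python) =====
-- def target_seq_with_clvg_site_group_by_chromosome(trgt_seq_dict, deli_str):
--     result_dict = {}
--     for trnscrpt_id, vals_arr in trgt_seq_dict.items():
--         dscript = vals_arr[0]
--         chrsm = dscript[dscript.index(deli_str) + len(deli_str):].split(":")[0]
--
--         if chrsm in result_dict:
--             if trnscrpt_id not in result_dict[chrsm]:
--                 result_dict[chrsm].update({trnscrpt_id: vals_arr})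
--         else:
--             result_dict.update({chrsm: {trnscrpt_id: vals_arr}})
--
--     return result_dict
-- ===== SOURCE B (Python) =====
-- def target_seq_with_clvg_site_group_by_chromosome(trgt_seq_dict, deli_str):
--     def chrsm_of(vals_arr):
--         dscript = vals_arr[0]
--         return dscript[dscript.index(deli_str) + len(deli_str):].split(":")[0]
--
--     triples = [(chrsm_of(vals_arr), trnscrpt_id, vals_arr)
--                for trnscrpt_id, vals_arr in trgt_seq_dict.items()]
--     result_dict = {}
--     for c in dict.fromkeys(ch for ch, _, _ in triples):
--         inner = {}
--         for ch, trnscrpt_id, vals_arr in triples: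
--             if ch == c and trnscrpt_id not in inner:
--                 inner[trnscrpt_id] = vals_arr
--         result_dict[c] = inner
--     return result_dict
-- ===== Notes on version B (the rewrite author's own statement) =====
-- stated objective: alternative
-- what changed: Replaces A's single-pass nested-dict mutation (membership tests and in-place updates per element) with a two-phase group-by: extract all (chromosome, id, vals) triples first, then for each distinct chromosome (first-occurrence order) build its inner dict by a filtered pass over the triples.
import Mathlib
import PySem

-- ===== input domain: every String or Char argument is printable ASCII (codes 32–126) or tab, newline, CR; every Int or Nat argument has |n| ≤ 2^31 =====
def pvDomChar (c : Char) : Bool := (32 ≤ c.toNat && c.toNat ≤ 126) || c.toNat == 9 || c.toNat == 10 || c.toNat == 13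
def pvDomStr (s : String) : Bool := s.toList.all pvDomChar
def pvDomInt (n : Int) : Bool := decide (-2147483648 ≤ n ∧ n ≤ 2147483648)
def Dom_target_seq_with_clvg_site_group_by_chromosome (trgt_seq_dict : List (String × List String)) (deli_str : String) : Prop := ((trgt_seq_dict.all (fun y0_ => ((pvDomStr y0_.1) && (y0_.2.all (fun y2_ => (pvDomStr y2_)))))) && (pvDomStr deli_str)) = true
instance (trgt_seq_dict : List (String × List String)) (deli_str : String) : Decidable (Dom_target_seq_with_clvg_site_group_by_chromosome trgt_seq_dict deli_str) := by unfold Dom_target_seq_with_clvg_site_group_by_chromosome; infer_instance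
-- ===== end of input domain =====

-- B is an alternative decomposition of A (two-phase group-by instead of incremental nested-dict
-- mutation); the equivalence below is about the return value (neither program mutates its input).

-- ===== PORT A =====
-- Shared key expression of both Pythons: dscript[dscript.index(deli_str)+len(deli_str):].split(":")[0]
-- (total form: vals_arr[0] as getD "" and .index via find; exact under Pre_, which demands
--  vals_arr ≠ [] and deli_str a substring of vals_arr[0], exactly where the Python does not raise).
def pvChrsm (vals_arr : List String) (deli_str : String) : String :=
  let dscript := (PySem.List.pyGet? vals_arr 0).getD ""
  let tail := PySem.Str.slice dscript (some (PySem.Str.find dscript deli_str + (PySem.Str.len deli_str : Int))) none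
  (((PySem.Str.split? tail ":").getD []).headD "")

def target_seq_with_clvg_site_group_by_chromosome (trgt_seq_dict : List (String × List String)) (deli_str : String) : List (String × List (String × List String)) :=
  (trgt_seq_dict.foldl
    (fun result_dict p =>
      let chrsm := pvChrsm p.2 deli_str
      if result_dict.contains chrsm then
        if !((result_dict.getD chrsm PySem.Dict.empty).contains p.1) then
          result_dict.insert chrsm ((result_dict.getD chrsm PySem.Dict.empty).insert p.1 p.2)
        else result_dict
      else result_dict.insert chrsm (PySem.Dict.empty.insert p.1 p.2))
    (PySem.Dict.empty : PySem.Dict String (PySem.Dict String (List String)))).items.map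
    (fun q => (q.1, q.2.items))

-- ===== PORT B =====
-- inner-dict pass of B: filter the triples for chromosome c, keep the first value per id
def pvInnerB (triples : List (String × String × List String)) (c : String) : PySem.Dict String (List String) :=
  triples.foldl
    (fun inner t => if t.1 == c && !(inner.contains t.2.1) then inner.insert t.2.1 t.2.2 else inner)
    PySem.Dict.empty

def target_seq_with_clvg_site_group_by_chromosome_alt (trgt_seq_dict : List (String × List String)) (deli_str : String) : List (String × List (String × List String)) :=
  let triples := trgt_seq_dict.map (fun p => (pvChrsm p.2 deli_str, p.1, p.2))
  ((PySem.List.dedup (triples.map (fun t => t.1))).foldl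
      (fun out c => out.insert c (pvInnerB triples c))
      (PySem.Dict.empty : PySem.Dict String (PySem.Dict String (List String)))).items.map
    (fun q => (q.1, q.2.items))

-- ===== PRECONDITION & SPEC =====
-- Pre_ excludes exactly the inputs where the Python A raises: an empty vals list (IndexError on
-- vals_arr[0]) or a first element not containing deli_str (ValueError from .index).
def Pre_target_seq_with_clvg_site_group_by_chromosome (trgt_seq_dict : List (String × List String)) (deli_str : String) : Prop :=
  ∀ p ∈ trgt_seq_dict, p.2 ≠ [] ∧ PySem.Str.isIn deli_str (p.2.headD "") = true
instance (trgt_seq_dict : List (String × List String)) (deli_str : String) : Decidable (Pre_target_seq_with_clvg_site_group_by_chromosome trgt_seq_dict deli_str) := by unfold Pre_target_seq_with_clvg_site_group_by_chromosome; infer_instance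

def pvWitness_target_seq_with_clvg_site_group_by_chromosome : (List (String × List String)) × String :=
  ([("t1", ["gene|chr1:100", "ACGT"]), ("t2", ["gene|chr2:5", "GG"]), ("t3", ["x|chr1:7", "C"])], "|")

def Spec_target_seq_with_clvg_site_group_by_chromosome (trgt_seq_dict : List (String × List String)) (deli_str : String) (out : List (String × List (String × List String))) : Prop := out = target_seq_with_clvg_site_group_by_chromosome_alt trgt_seq_dict deli_str
instance (trgt_seq_dict : List (String × List String)) (deli_str : String) (out : List (String × List (String × List String))) : Decidable (Spec_target_seq_with_clvg_site_group_by_chromosome trgt_seq_dict deli_str out) := by unfold Spec_target_seq_with_clvg_site_group_by_chromosome; infer_instance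

-- ===== CLAIM (what is proved, stated in full; the proofs are below) =====
def Claim_equal_target_seq_with_clvg_site_group_by_chromosome : Prop := ∀ (trgt_seq_dict : List (String × List String)) (deli_str : String), Dom_target_seq_with_clvg_site_group_by_chromosome trgt_seq_dict deli_str → Pre_target_seq_with_clvg_site_group_by_chromosome trgt_seq_dict deli_str → Spec_target_seq_with_clvg_site_group_by_chromosome trgt_seq_dict deli_str (target_seq_with_clvg_site_group_by_chromosome trgt_seq_dict deli_str)

-- ===== LEMMAS AND PROOFS =====

-- A's loop body, phrased on a precomputed (chromosome, id, vals) triple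
def pvStepA (d : PySem.Dict String (PySem.Dict String (List String)))
    (t : String × String × List String) : PySem.Dict String (PySem.Dict String (List String)) :=
  if d.contains t.1 then
    if !((d.getD t.1 PySem.Dict.empty).contains t.2.1) then
      d.insert t.1 ((d.getD t.1 PySem.Dict.empty).insert t.2.1 t.2.2)
    else d
  else d.insert t.1 (PySem.Dict.empty.insert t.2.1 t.2.2)

theorem pvInnerB_empty_of_not_mem (l : List (String × String × List String)) (c : String)
    (h : c ∉ l.map (fun t => t.1)) : pvInnerB l c = PySem.Dict.empty := by
  induction l with
  | nil => rfl
  | cons t l ih =>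
    simp only [List.map_cons, List.mem_cons, not_or] at h
    have hne : (t.1 == c) = false := by
      simp only [beq_eq_false_iff_ne, ne_eq]
      exact fun e => h.1 e.symm
    simp only [pvInnerB, List.foldl_cons, hne, Bool.false_and, Bool.false_eq_true, if_false] at *
    exact ih h.2

theorem pvInnerB_append_singleton (l : List (String × String × List String))
    (t : String × String × List String) (c : String) :
    pvInnerB (l ++ [t]) c =
      (if t.1 == c && !((pvInnerB l c).contains t.2.1) then
        (pvInnerB l c).insert t.2.1 t.2.2 else pvInnerB l c) := by
  simp [pvInnerB, List.foldl_append]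

theorem pvAfold (ts : List (String × String × List String)) :
    List.foldl pvStepA (PySem.Dict.empty : PySem.Dict String (PySem.Dict String (List String))) ts
      = PySem.Dict.mk ((PySem.List.dedup (ts.map (fun t => t.1))).map (fun c => (c, pvInnerB ts c))) := by
  induction ts using List.reverseRecOn with
  | nil => rfl
  | append_singleton l t ih =>
    rw [List.foldl_append, List.foldl_cons, List.foldl_nil, ih]
    set ks := PySem.List.dedup (l.map (fun t => t.1)) with hks
    have hksnodup : ks.Nodup := PySem.List.nodup_dedup _
    set M := ks.map (fun c => (c, pvInnerB l c)) with hM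
    have hkeys : (PySem.Dict.mk M).keys = ks := by
      simp [PySem.Dict.keys, hM, List.map_map, Function.comp_def]
    have hcont : ∀ x : String, (PySem.Dict.mk M).contains x = decide (x ∈ l.map (fun t => t.1)) := by
      intro x
      rw [PySem.Dict.contains_eq_decide_mem_keys, hkeys]
      simp [hks]
    have hdedup : PySem.List.dedup ((l ++ [t]).map (fun t => t.1))
        = if t.1 ∈ l.map (fun t => t.1) then ks else ks ++ [t.1] := by
      rw [List.map_append]
      simp only [List.map_cons, List.map_nil]
      rw [PySem.List.dedup_eq_ofList, PySem.Set.ofList_append_singleton, PySem.Set.add_eq_ite]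
      by_cases h : t.1 ∈ List.map (fun t => t.1) l
      · rw [if_pos ((PySem.Set.mem_ofList _ _).mpr h), if_pos h, hks, PySem.List.dedup_eq_ofList]
      · rw [if_neg (fun hx => h ((PySem.Set.mem_ofList _ _).mp hx)), if_neg h, hks,
          PySem.List.dedup_eq_ofList]
    by_cases hmem : t.1 ∈ l.map (fun t => t.1)
    · -- t's chromosome already present
      have hcont' : (PySem.Dict.mk M).contains t.1 = true := by
        rw [hcont]; exact decide_eq_true hmem
      have hgetD : (PySem.Dict.mk M).getD t.1 PySem.Dict.empty = pvInnerB l t.1 := by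
        apply PySem.Dict.getD_of_mem_items
        · exact List.mem_map_of_mem (by rw [hks, PySem.List.mem_dedup]; exact hmem)
        · rw [hkeys]; exact hksnodup
      rw [hdedup, if_pos hmem]
      by_cases hc : (pvInnerB l t.1).contains t.2.1 = true
      · -- id already in that group: nothing changes
        simp only [pvStepA, hcont', hgetD, hc, Bool.not_true, Bool.false_eq_true, if_false, if_true]
        congr 1
        apply List.map_congr_left
        intro c hcks
        rw [pvInnerB_append_singleton]
        by_cases hct : t.1 = c
        · subst hct; simp [hc]
        · have : (t.1 == c) = false := by simpa using hct
          simp [this]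
      · -- new id in an existing group: overwrite the inner dict in place
        simp only [pvStepA, hcont', hgetD, hc, Bool.not_false, if_true]
        apply PySem.Dict.ext
        rw [PySem.Dict.items_insert_of_contains _ _ hcont']
        show M.map _ = List.map _ _
        rw [hM, List.map_map]
        apply List.map_congr_left
        intro c hcks
        have hc' : (pvInnerB l t.1).contains t.2.1 = false := Bool.eq_false_iff.mpr hc
        by_cases hct : t.1 = c
        · subst hct
          simp [pvInnerB_append_singleton, hc']
        · have hb : (t.1 == c) = false := by simpa using hct
          simp only [pvInnerB_append_singleton, hb, Bool.false_and, Bool.false_eq_true, if_false,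
            Function.comp_apply]
          rw [if_neg]
          simp only [beq_iff_eq]
          exact fun e => hct e.symm
    · -- new chromosome: append a fresh singleton group
      have hcont' : (PySem.Dict.mk M).contains t.1 = false := by
        rw [hcont]; exact decide_eq_false hmem
      have hinnernil : pvInnerB l t.1 = PySem.Dict.empty := pvInnerB_empty_of_not_mem l t.1 hmem
      simp only [pvStepA, hcont', Bool.false_eq_true, if_false]
      apply PySem.Dict.ext
      rw [PySem.Dict.items_insert_of_not_contains _ _ hcont']
      rw [hdedup, if_neg hmem, List.map_append]
      show M ++ _ = List.map _ ks ++ _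
      congr 1
      · rw [hM]
        apply List.map_congr_left
        intro c hcks
        have hcl : c ∈ l.map (fun t => t.1) := by
          rw [hks, PySem.List.mem_dedup] at hcks; exact hcks
        have hb : (t.1 == c) = false := by
          simp only [beq_eq_false_iff_ne, ne_eq]
          exact fun e => hmem (e ▸ hcl)
        simp [pvInnerB_append_singleton, hb]
      · simp [pvInnerB_append_singleton, hinnernil]

-- A's loop, with the key expression abstracted, is the triple-fold of pvStepA
theorem pvFoldA_gen (l : List (String × List String))
    (key : (String × List String) → String) :
    List.foldl (fun (result_dict : PySem.Dict String (PySem.Dict String (List String))) p =>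
        let chrsm := key p
        if result_dict.contains chrsm then
          if !((result_dict.getD chrsm PySem.Dict.empty).contains p.1) then
            result_dict.insert chrsm ((result_dict.getD chrsm PySem.Dict.empty).insert p.1 p.2)
          else result_dict
        else result_dict.insert chrsm (PySem.Dict.empty.insert p.1 p.2))
      PySem.Dict.empty l
      = List.foldl pvStepA PySem.Dict.empty (l.map (fun p => (key p, p.1, p.2))) := by
  rw [List.foldl_map]
  exact List.foldl_ext _ _ _ (fun d p _ => rfl)

-- the two ports agree on ALL inputs (the total Lean forms extend the Pythons outside Pre_ identically)
theorem pvPortsAgree (l : List (String × List String)) (deli : String) :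
    target_seq_with_clvg_site_group_by_chromosome l deli
      = target_seq_with_clvg_site_group_by_chromosome_alt l deli := by
  unfold target_seq_with_clvg_site_group_by_chromosome
    target_seq_with_clvg_site_group_by_chromosome_alt
  dsimp only
  rw [pvFoldA_gen l (fun p => pvChrsm p.2 deli)]
  generalize l.map (fun p => (pvChrsm p.2 deli, p.1, p.2)) = ts
  rw [pvAfold ts]
  congr 1
  rw [PySem.Dict.items_foldl_insert_fresh _ (fun c => c) (fun c => pvInnerB ts c)
    PySem.Dict.empty (fun a _ => PySem.Dict.contains_empty a)
    (by simp)]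
  rfl

-- ===== VERDICT (by name: the statement is the Claim_ definition above) =====
theorem target_seq_with_clvg_site_group_by_chromosome_spec : Claim_equal_target_seq_with_clvg_site_group_by_chromosome := by
  intro l deli _ _
  exact pvPortsAgree l deli
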